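-- pv_equiv track=rewrite | github.com/Cara1205/dbms-meta | modules/utils.py | findMatchRow
-- ===== SOURCE A (Python) =====
-- def findMatchRow(dataList, filter_value, filter_index, param):
--     row = -1
--     rows = []
--     for data in dataList:
--         row = row + 1
--         if param == '!=':
--             if data[filter_index] != filter_value:
--                 rows.append(row)
--         elif param == '>=':
--             if data[filter_index] >= filter_value:
--                 rows.append(row)
--         elif param == '<=':
--             if data[filter_index] <= filter_value:
--                 rows.append(row)
--         elif param == '>':
--             if data[filter_index] > filter_value:
--                 rows.append(row)
--         elif param == '<':
--             if data[filter_index] < filter_value: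
--                 rows.append(row)
--         elif param == '=':
--             if data[filter_index] == filter_value:
--                 rows.append(row)
--
--     return rows
-- ===== SOURCE B (Python) =====
-- def _merge(xs, ys):
--     out = []
--     i = j = 0
--     while i < len(xs) and j < len(ys):
--         if xs[i] < ys[j]:
--             out.append(xs[i]); i += 1
--         else:
--             out.append(ys[j]); j += 1
--     return out + xs[i:] + ys[j:]
--
--
-- def findMatchRow(dataList, filter_value, filter_index, param):
--     if param not in ('!=', '>=', '<=', '>', '<', '='):
--         return []
--     lt, eq, gt = [], [], []
--     for i, d in enumerate(dataList):
--         x = d[filter_index]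
--         if x < filter_value:
--             lt.append(i)
--         elif x == filter_value:
--             eq.append(i)
--         else:
--             gt.append(i)
--     if param == '<':
--         return lt
--     if param == '=':
--         return eq
--     if param == '>':
--         return gt
--     if param == '<=':
--         return _merge(lt, eq)
--     if param == '>=':
--         return _merge(eq, gt)
--     return _merge(lt, gt)
-- ===== Notes on version B (the rewrite author's own statement) =====
-- stated objective: alternative
-- what changed: Replaces A's per-row six-way if/elif filter with a staged algorithm: one trichotomy pass partitions row indices into lt/eq/gt buckets, and each operator's answer is a bucket or a two-pointer merge of two buckets.
import Mathlib
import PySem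

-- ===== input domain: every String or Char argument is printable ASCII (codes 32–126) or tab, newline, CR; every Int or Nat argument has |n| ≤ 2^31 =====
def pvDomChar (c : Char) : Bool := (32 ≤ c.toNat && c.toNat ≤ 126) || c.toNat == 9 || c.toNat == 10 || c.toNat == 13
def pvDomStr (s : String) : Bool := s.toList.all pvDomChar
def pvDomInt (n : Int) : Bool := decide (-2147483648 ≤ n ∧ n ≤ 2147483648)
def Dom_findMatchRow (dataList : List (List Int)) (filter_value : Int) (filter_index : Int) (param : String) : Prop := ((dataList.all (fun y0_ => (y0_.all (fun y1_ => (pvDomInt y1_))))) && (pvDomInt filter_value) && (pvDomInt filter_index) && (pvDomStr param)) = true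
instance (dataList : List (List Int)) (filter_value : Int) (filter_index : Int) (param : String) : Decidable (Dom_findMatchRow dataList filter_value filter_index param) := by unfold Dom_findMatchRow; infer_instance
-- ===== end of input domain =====

-- B replaces A's per-row six-way if/elif filter by a staged algorithm: one trichotomy
-- pass partitions row indices into lt/eq/gt buckets, and each operator's answer is one
-- bucket or a two-pointer merge of two buckets (objective: alternative).


-- ===== PORT A =====
-- one loop iteration of A: bump the row counter, then the if/elif chain on param;
-- data[filter_index] is ported as pyGetD … 0 — exact under Pre_ (index in range whenever a branch fires)
def stepA (filter_value filter_index : Int) (param : String) (st : Int × List Int) (data : List Int) : Int × List Int :=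
  let row := st.1 + 1
  let rows := st.2
  let rows :=
    if param = "!=" then (if PySem.List.pyGetD data filter_index 0 ≠ filter_value then rows ++ [row] else rows)
    else if param = ">=" then (if PySem.List.pyGetD data filter_index 0 ≥ filter_value then rows ++ [row] else rows)
    else if param = "<=" then (if PySem.List.pyGetD data filter_index 0 ≤ filter_value then rows ++ [row] else rows)
    else if param = ">" then (if PySem.List.pyGetD data filter_index 0 > filter_value then rows ++ [row] else rows)
    else if param = "<" then (if PySem.List.pyGetD data filter_index 0 < filter_value then rows ++ [row] else rows)
    else if param = "=" then (if PySem.List.pyGetD data filter_index 0 = filter_value then rows ++ [row] else rows)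
    else rows
  (row, rows)

def findMatchRow (dataList : List (List Int)) (filter_value : Int) (filter_index : Int) (param : String) : List Int :=
  (dataList.foldl (stepA filter_value filter_index param) (-1, [])).2

-- ===== PORT B =====
-- _merge: the two-pointer merge of Source B (while both nonempty pick the smaller head; then the leftovers)
def pvMerge : List Int → List Int → List Int
  | [], ys => ys
  | x :: xs, [] => x :: xs
  | x :: xs, y :: ys => if x < y then x :: pvMerge xs (y :: ys) else y :: pvMerge (x :: xs) ys

-- one iteration of B's partition loop: route index i into the lt / eq / gt bucket
def stepB (filter_value filter_index : Int) (st : List Int × List Int × List Int) (p : Int × List Int) :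
    List Int × List Int × List Int :=
  let x := PySem.List.pyGetD p.2 filter_index 0
  if x < filter_value then (st.1 ++ [p.1], st.2.1, st.2.2)
  else if x = filter_value then (st.1, st.2.1 ++ [p.1], st.2.2)
  else (st.1, st.2.1, st.2.2 ++ [p.1])

def findMatchRow_alt (dataList : List (List Int)) (filter_value : Int) (filter_index : Int) (param : String) : List Int :=
  if ¬ (param = "!=" ∨ param = ">=" ∨ param = "<=" ∨ param = ">" ∨ param = "<" ∨ param = "=") then []
  else
    let st := (PySem.List.enumerate dataList 0).foldl (stepB filter_value filter_index) ([], [], [])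
    let lt := st.1
    let eq := st.2.1
    let gt := st.2.2
    if param = "<" then lt
    else if param = "=" then eq
    else if param = ">" then gt
    else if param = "<=" then pvMerge lt eq
    else if param = ">=" then pvMerge eq gt
    else pvMerge lt gt

-- ===== PRECONDITION & SPEC =====
-- Pre_ excludes exactly the inputs on which A raises IndexError: a recognised operator
-- together with some row for which filter_index is not a valid Python index.
def Pre_findMatchRow (dataList : List (List Int)) (filter_value : Int) (filter_index : Int) (param : String) : Prop :=
  param ∈ ["!=", ">=", "<=", ">", "<", "="] → ∀ d ∈ dataList, PySem.Raise.InRange d.length filter_index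
instance (dataList : List (List Int)) (filter_value : Int) (filter_index : Int) (param : String) : Decidable (Pre_findMatchRow dataList filter_value filter_index param) := by unfold Pre_findMatchRow; infer_instance

def pvWitness_findMatchRow : List (List Int) × Int × Int × String := ([[1, 2], [3, 4], [0, 5]], 1, 0, ">=")

def Spec_findMatchRow (dataList : List (List Int)) (filter_value : Int) (filter_index : Int) (param : String) (out : List Int) : Prop := out = findMatchRow_alt dataList filter_value filter_index param
instance (dataList : List (List Int)) (filter_value : Int) (filter_index : Int) (param : String) (out : List Int) : Decidable (Spec_findMatchRow dataList filter_value filter_index param out) := by unfold Spec_findMatchRow; infer_instance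

-- ===== CLAIM (what is proved, stated in full; the proofs are below) =====
def Claim_equal_findMatchRow : Prop := ∀ (dataList : List (List Int)) (filter_value : Int) (filter_index : Int) (param : String), Dom_findMatchRow dataList filter_value filter_index param → Pre_findMatchRow dataList filter_value filter_index param → Spec_findMatchRow dataList filter_value filter_index param (findMatchRow dataList filter_value filter_index param)

-- ===== LEMMAS AND PROOFS =====

-- the boolean decided by A's if/elif chain for a given param (false for unknown params)
def branchB (param : String) (x fv : Int) : Bool :=
  if param = "!=" then x ≠ fv
  else if param = ">=" then x ≥ fv
  else if param = "<=" then x ≤ fv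
  else if param = ">" then x > fv
  else if param = "<" then x < fv
  else if param = "=" then x = fv
  else false

-- the indices selected by predicate f on the column value, in row order from start k
def sel (f : Int → Bool) (fi : Int) (l : List (List Int)) (k : Int) : List Int :=
  (PySem.List.enumerate l k).filterMap
    (fun p => if f (PySem.List.pyGetD p.2 fi 0) then some p.1 else none)

theorem sel_nil (f : Int → Bool) (fi k : Int) : sel f fi [] k = [] := by
  simp [sel, PySem.List.enumerate]

theorem sel_cons (f : Int → Bool) (fi k : Int) (d : List Int) (t : List (List Int)) :
    sel f fi (d :: t) k =
      if f (PySem.List.pyGetD d fi 0) then k :: sel f fi t (k + 1) else sel f fi t (k + 1) := by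
  unfold sel
  rw [PySem.List.enumerate_cons, List.filterMap_cons]
  by_cases h : f (PySem.List.pyGetD d fi 0) = true <;> simp [h]

theorem stepA_eq (fv fi : Int) (param : String) (st : Int × List Int) (d : List Int) :
    stepA fv fi param st d =
      (st.1 + 1, if branchB param (PySem.List.pyGetD d fi 0) fv then st.2 ++ [st.1 + 1] else st.2) := by
  simp only [stepA, branchB]
  split_ifs <;> simp_all <;> omega

theorem foldA_eq (fv fi : Int) (param : String) (l : List (List Int)) (r : Int) (acc : List Int) :
    (l.foldl (stepA fv fi param) (r, acc)).2 =
      acc ++ sel (fun x => branchB param x fv) fi l (r + 1) := by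
  induction l generalizing r acc with
  | nil => simp [sel_nil]
  | cons d t ih =>
      rw [List.foldl_cons, stepA_eq, sel_cons]
      by_cases h : branchB param (PySem.List.pyGetD d fi 0) fv = true
      · simp only [h, if_true]
        rw [ih]
        simp [List.append_assoc]
      · simp only [Bool.not_eq_true] at h
        simp only [h, if_false, Bool.false_eq_true]
        rw [ih]

theorem foldB_eq (fv fi : Int) (l : List (List Int)) (k : Int) (a b c : List Int) :
    ((PySem.List.enumerate l k).foldl (stepB fv fi) (a, b, c)) =
      (a ++ sel (fun x => x < fv) fi l k,
       b ++ sel (fun x => !(x < fv) && (x = fv)) fi l k,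
       c ++ sel (fun x => !(x < fv) && !(x = fv)) fi l k) := by
  induction l generalizing k a b c with
  | nil => simp [sel_nil, PySem.List.enumerate]
  | cons d t ih =>
      rw [PySem.List.enumerate_cons, List.foldl_cons]
      simp only [stepB]
      by_cases h1 : PySem.List.pyGetD d fi 0 < fv
      · rw [if_pos h1, ih]
        simp [sel_cons, h1, List.append_assoc]
      · by_cases h2 : PySem.List.pyGetD d fi 0 = fv
        · rw [if_neg h1, if_pos h2, ih]
          simp [sel_cons, h1, h2, List.append_assoc]
        · rw [if_neg h1, if_neg h2, ih]
          simp [sel_cons, h1, h2, List.append_assoc]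

theorem sel_lower (f : Int → Bool) (fi : Int) (l : List (List Int)) (k : Int) :
    ∀ x ∈ sel f fi l k, k ≤ x := by
  induction l generalizing k with
  | nil => simp [sel_nil]
  | cons d t ih =>
      intro x hx
      rw [sel_cons] at hx
      by_cases h : f (PySem.List.pyGetD d fi 0) = true
      · rw [if_pos h, List.mem_cons] at hx
        rcases hx with hx | hx
        · omega
        · have := ih (k + 1) x hx; omega
      · simp only [Bool.not_eq_true] at h
        rw [if_neg (by simp [h])] at hx
        have := ih (k + 1) x hx; omega

theorem pvMerge_nil_right (xs : List Int) : pvMerge xs [] = xs := by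
  cases xs <;> simp [pvMerge]

theorem pvMerge_cons_left (k : Int) (xs ys : List Int) (h : ∀ y ∈ ys, k < y) :
    pvMerge (k :: xs) ys = k :: pvMerge xs ys := by
  cases ys with
  | nil => simp [pvMerge_nil_right, pvMerge]
  | cons y t =>
      have : k < y := h y (List.mem_cons_self ..)
      simp [pvMerge, this]

theorem pvMerge_cons_right (k : Int) (xs ys : List Int) (h : ∀ x ∈ xs, k < x) :
    pvMerge xs (k :: ys) = k :: pvMerge xs ys := by
  cases xs with
  | nil => simp [pvMerge]
  | cons x t =>
      have : k < x := h x (List.mem_cons_self ..)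
      simp [pvMerge, not_lt.mpr (le_of_lt this)]

theorem merge_sel (f g : Int → Bool) (fi : Int) (l : List (List Int)) (k : Int)
    (hdisj : ∀ x, ¬(f x = true ∧ g x = true)) :
    pvMerge (sel f fi l k) (sel g fi l k) = sel (fun x => f x || g x) fi l k := by
  induction l generalizing k with
  | nil => simp [sel_nil, pvMerge]
  | cons d t ih =>
      rw [sel_cons, sel_cons, sel_cons]
      by_cases hf : f (PySem.List.pyGetD d fi 0) = true
      · have hg : ¬ g (PySem.List.pyGetD d fi 0) = true := fun hg => hdisj _ ⟨hf, hg⟩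
        simp only [Bool.not_eq_true] at hg
        rw [if_pos hf, if_neg (by simp [hg]), if_pos (by simp [hf])]
        rw [pvMerge_cons_left k _ _ (fun y hy => by have := sel_lower g fi t (k + 1) y hy; omega)]
        rw [ih (k + 1)]
      · simp only [Bool.not_eq_true] at hf
        by_cases hg : g (PySem.List.pyGetD d fi 0) = true
        · rw [if_neg (by simp [hf]), if_pos hg, if_pos (by simp [hg])]
          rw [pvMerge_cons_right k _ _ (fun x hx => by have := sel_lower f fi t (k + 1) x hx; omega)]
          rw [ih (k + 1)]
        · simp only [Bool.not_eq_true] at hg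
          rw [if_neg (by simp [hf]), if_neg (by simp [hg]), if_neg (by simp [hf, hg])]
          exact ih (k + 1)

theorem sel_congr (f g : Int → Bool) (fi : Int) (l : List (List Int)) (k : Int)
    (h : ∀ x, f x = g x) : sel f fi l k = sel g fi l k := by
  unfold sel
  exact List.filterMap_congr (fun p _ => by rw [h])

-- ===== VERDICT (by name: the statement is the Claim_ definition above) =====
theorem findMatchRow_spec : Claim_equal_findMatchRow := by
  intro dataList fv fi param _ _
  unfold Spec_findMatchRow findMatchRow findMatchRow_alt
  rw [foldA_eq]
  simp only [foldB_eq, List.nil_append]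
  by_cases h5 : param = "<"
  · subst h5; simp
    exact sel_congr _ _ _ _ _ (fun x => by simp [branchB])
  by_cases h6 : param = "="
  · subst h6; simp
    exact sel_congr _ _ _ _ _ (fun x => by simp only [branchB, String.reduceEq, reduceIte]; by_cases h : x < fv <;> by_cases h2 : x = fv <;> simp [h, h2] <;> omega)
  by_cases h4 : param = ">"
  · subst h4; simp
    exact sel_congr _ _ _ _ _ (fun x => by simp only [branchB, String.reduceEq, reduceIte]; by_cases h : x < fv <;> by_cases h2 : x = fv <;> simp [h, h2] <;> omega)
  by_cases h3 : param = "<="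
  · subst h3; simp
    rw [merge_sel _ _ _ _ _ (fun x hx => by simp at hx; omega)]
    exact sel_congr _ _ _ _ _ (fun x => by simp only [branchB, String.reduceEq, reduceIte]; by_cases h : x < fv <;> by_cases h2 : x = fv <;> simp [h, h2] <;> omega)
  by_cases h2 : param = ">="
  · subst h2; simp
    rw [merge_sel _ _ _ _ _ (fun x hx => by simp at hx; omega)]
    exact sel_congr _ _ _ _ _ (fun x => by simp only [branchB, String.reduceEq, reduceIte]; by_cases h : x < fv <;> by_cases h2 : x = fv <;> simp [h, h2] <;> omega)
  by_cases h1 : param = "!="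
  · subst h1; simp
    rw [merge_sel _ _ _ _ _ (fun x hx => by simp at hx; omega)]
    exact sel_congr _ _ _ _ _ (fun x => by simp only [branchB, String.reduceEq, reduceIte]; by_cases h : x < fv <;> by_cases h2 : x = fv <;> simp [h, h2] <;> omega)
  · rw [if_pos (by simp [h1, h2, h3, h4, h5, h6])]
    have : ∀ l k, sel (fun x => branchB param x fv) fi l k = [] := by
      intro l k
      induction l generalizing k with
      | nil => exact sel_nil _ _ _
      | cons d t ih =>
          rw [sel_cons, if_neg (by simp [branchB, h1, h2, h3, h4, h5, h6]), ih]
    exact this dataList 0
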